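-- pv_equiv track=rewrite | github.com/andrewbo29/Arabic_Lang_Recognition | decompose/space.py | _find_zeros
-- ===== SOURCE A (Python) =====
-- def _find_zeros(a):
--     zeros = []
--     x = _find_zero(a, 0)
--     while x is not None:
--         zeros.append(x)
--         if x[1] >= len(a):
--             break
--         x = _find_zero(a, x[1])
--     return zeros
--
-- def _find_zero(a, s):
--     while s < len(a) and a[s] != 0:
--         s += 1
--     if s < len(a):
--         start = s
--         while s < len(a) and a[s] == 0:
--             s += 1
--         return start, s
--     return None
-- ===== SOURCE B (Python) =====
-- from itertools import groupby
--
-- def _find_zeros(a):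
--     zeros = []
--     i = 0
--     for key, grp in groupby(a, key=lambda v: v == 0):
--         n = sum(1 for _ in grp)
--         if key:
--             zeros.append((i, i + n))
--         i += n
--     return zeros
-- ===== Notes on version B (the rewrite author's own statement) =====
-- stated objective: idiomatic
-- what changed: Replaced the skip-nonzeros/collect-zeros helper with its outer resume loop by a single itertools.groupby pass that splits the list into maximal runs keyed by v == 0, measures each run and emits (i, i+len) for the zero runs.
import Mathlib
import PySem

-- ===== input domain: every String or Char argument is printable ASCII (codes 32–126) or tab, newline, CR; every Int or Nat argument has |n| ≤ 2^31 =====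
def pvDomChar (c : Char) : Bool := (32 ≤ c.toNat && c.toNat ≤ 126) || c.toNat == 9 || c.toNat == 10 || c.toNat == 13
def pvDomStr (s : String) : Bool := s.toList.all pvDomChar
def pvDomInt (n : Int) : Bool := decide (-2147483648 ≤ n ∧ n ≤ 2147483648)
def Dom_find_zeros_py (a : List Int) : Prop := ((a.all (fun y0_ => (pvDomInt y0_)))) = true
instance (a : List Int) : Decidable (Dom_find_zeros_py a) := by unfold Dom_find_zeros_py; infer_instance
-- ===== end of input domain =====

-- B replaces A's skip-nonzeros/collect-zeros helper plus resume loop by one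
-- itertools.groupby pass over maximal runs keyed by (v == 0) (idiomatic; same O(n) cost).

-- ===== PORT A =====
-- first while of _find_zero: advance s past nonzero entries
def skipNZ (a : List Int) (s : Nat) : Nat :=
  if h : s < a.length ∧ ¬ a[s]! = 0 then skipNZ a (s + 1) else s
termination_by a.length - s
decreasing_by have := h.1; omega

-- second while of _find_zero: advance s past zero entries
def collectZ (a : List Int) (s : Nat) : Nat :=
  if h : s < a.length ∧ a[s]! = 0 then collectZ a (s + 1) else s
termination_by a.length - s
decreasing_by have := h.1; omega

def find_zero (a : List Int) (s : Nat) : Option (Nat × Nat) :=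
  let s' := skipNZ a s
  if s' < a.length then some (s', collectZ a s') else none

-- the outer while of _find_zeros; fuel only makes the loop total (a.length + 1 always suffices)
def fzLoop (a : List Int) : Nat → Nat → List (Int × Int)
  | 0, _ => []
  | fuel + 1, s =>
    match find_zero a s with
    | none => []
    | some (st, e) =>
      ((st : Int), (e : Int)) :: (if a.length ≤ e then [] else fzLoop a fuel e)

def find_zeros_py (a : List Int) : List (Int × Int) := fzLoop a (a.length + 1) 0

-- ===== PORT B =====
-- the groupby loop: each step consumes one maximal run keyed by (v == 0)
def fzAltGo : List Int → Nat → List (Int × Int)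
  | [], _ => []
  | x :: rest, i =>
    let k := x == 0
    let w := rest.takeWhile (fun v => (v == 0) == k)
    let n := w.length + 1
    let out := fzAltGo (rest.drop w.length) (i + n)
    if k then ((i : Int), ((i + n : Nat) : Int)) :: out else out
termination_by l _ => l.length
decreasing_by simp [List.length_drop]

def find_zeros_py_alt (a : List Int) : List (Int × Int) := fzAltGo a 0

-- ===== PRECONDITION & SPEC =====
def Spec_find_zeros_py (a : List Int) (out : List (Int × Int)) : Prop := out = find_zeros_py_alt a
instance (a : List Int) (out : List (Int × Int)) : Decidable (Spec_find_zeros_py a out) := by unfold Spec_find_zeros_py; infer_instance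

-- ===== CLAIM (what is proved, stated in full; the proofs are below) =====
def Claim_equal_find_zeros_py : Prop := ∀ (a : List Int), Dom_find_zeros_py a → Spec_find_zeros_py a (find_zeros_py a)

-- ===== LEMMAS AND PROOFS =====

lemma collectZ_eq (a : List Int) (s : Nat) :
    collectZ a s = s + ((a.drop s).takeWhile (fun v => v == 0)).length := by
  fun_induction collectZ a s with
  | case1 s h ih =>
    obtain ⟨hs, hz⟩ := h
    rw [List.drop_eq_getElem_cons hs]
    rw [getElem!_pos a s hs] at hz
    simp [hz, ih]
    omega
  | case2 s h =>
    by_cases hs : s < a.length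
    · have hz : ¬ a[s]! = 0 := fun hz => h ⟨hs, hz⟩
      rw [List.drop_eq_getElem_cons hs]
      rw [getElem!_pos a s hs] at hz
      simp [hz]
    · rw [List.drop_eq_nil_of_le (by omega)]
      simp

lemma fzAltGo_cons_nonzero (x : Int) (hx : ¬ x = 0) (rest : List Int) (i : Nat) :
    fzAltGo (x :: rest) i = fzAltGo rest (i + 1) := by
  have hk : (x == 0) = false := by simpa using hx
  match rest with
  | [] => simp [fzAltGo, hk]
  | y :: r2 =>
    by_cases hy : y = 0
    · have hyk : (y == 0) = true := by simpa using hy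
      simp [fzAltGo, hk, hyk]
    · have hyk : (y == 0) = false := by simpa using hy
      rw [fzAltGo, fzAltGo]
      simp only [hk, hyk, List.takeWhile_cons, beq_self_eq_true, List.length_cons,
        List.drop_succ_cons, if_true]
      rw [if_neg (by simp), if_neg (by simp)]
      congr 1
      omega

lemma loop_eq (a : List Int) :
    ∀ (n s fuel : Nat), a.length - s = n → n < fuel →
      fzLoop a fuel s = fzAltGo (a.drop s) s := by
  intro n
  induction n using Nat.strong_induction_on with
  | _ n IH =>
    intro s fuel hn hf
    obtain ⟨f, rfl⟩ : ∃ f, fuel = f + 1 := ⟨fuel - 1, by omega⟩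
    rcases h : a.drop s with _ | ⟨x, rest⟩
    · -- s past the end: find_zero returns none, both sides empty
      have hs : a.length ≤ s := by
        by_contra hs
        exact absurd h (by simp [List.drop_eq_nil_iff]; omega)
      have hskip : skipNZ a s = s := by
        rw [skipNZ]; rw [dif_neg (by omega)]
      have hfz : find_zero a s = none := by
        simp only [find_zero, hskip]
        rw [if_neg (by omega)]
      rw [fzLoop, hfz, fzAltGo]
    · have hs : s < a.length := by
        by_contra hs
        rw [List.drop_eq_nil_of_le (by omega)] at h
        exact absurd h (by simp)
      have hxq : a[s]? = some x := by rw [← List.head?_drop, h]; rfl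
      rw [List.getElem?_eq_getElem hs, Option.some_inj] at hxq
      have hxbang : a[s]! = x := by rw [getElem!_pos a s hs, hxq]
      have hrest : a.drop (s + 1) = rest := by
        have h1 : (a.drop s).drop 1 = a.drop (s + 1) := by rw [List.drop_drop]
        simpa [h] using h1.symm
      by_cases hx0 : x = 0
      · -- head of the suffix is a zero: emit a run
        set L := (rest.takeWhile (fun v => v == 0)).length with hL
        have hskip : skipNZ a s = s := by
          rw [skipNZ]; rw [dif_neg (by simp [hxbang, hx0])]
        have hcol : collectZ a s = s + (L + 1) := by
          rw [collectZ_eq, h]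
          simp [hx0, hL]
        have hfz : find_zero a s = some (s, s + (L + 1)) := by
          simp only [find_zero, hskip, hcol]
          rw [if_pos hs]
        have hdropE : a.drop (s + (L + 1)) = rest.drop L := by
          rw [← hrest, List.drop_drop]
          congr 1
          omega
        have hkey : (fun v : Int => (v == 0) == true) = (fun v : Int => v == 0) :=
          funext fun v => by simp
        rw [fzLoop, hfz, fzAltGo]
        have hk : (x == 0) = true := by simp [hx0]
        simp only [hk, hkey, ← hL, if_true]
        congr 1
        by_cases hend : a.length ≤ s + (L + 1)
        · rw [if_pos hend]
          have hnil : rest.drop L = [] := by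
            rw [← hdropE]
            exact List.drop_eq_nil_of_le (by omega)
          rw [hnil, fzAltGo]
        · rw [if_neg hend]
          rw [IH (a.length - (s + (L + 1))) (by omega) (s + (L + 1)) f rfl (by omega)]
          rw [hdropE]
      · -- head nonzero: both sides step over it
        have hskip : skipNZ a s = skipNZ a (s + 1) := by
          rw [skipNZ]; rw [dif_pos ⟨hs, by simp [hxbang, hx0]⟩]
        have hstep : fzLoop a (f + 1) s = fzLoop a (f + 1) (s + 1) := by
          rw [fzLoop, fzLoop]
          simp only [find_zero, hskip]
        rw [hstep, fzAltGo_cons_nonzero x hx0 rest s]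
        rw [IH (a.length - (s + 1)) (by omega) (s + 1) (f + 1) rfl (by omega), hrest]

-- ===== VERDICT (by name: the statement is the Claim_ definition above) =====
theorem find_zeros_py_spec : Claim_equal_find_zeros_py := by
  intro a _
  unfold Spec_find_zeros_py find_zeros_py find_zeros_py_alt
  have := loop_eq a (a.length - 0) 0 (a.length + 1) rfl (by omega)
  simpa using this
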